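-- pv_equiv track=rewrite | github.com/aLexzzz430/Cognitive-OS | core/orchestration/structured_answer.py | _extract_local_patch
-- ===== SOURCE A (Python) =====
-- from typing import Any, Callable, Dict, List, Optional, Sequence, Set, Tuple
--
-- Grid = List[List[int]]
--
-- def _extract_local_patch(grid: Grid, row_idx: int, col_idx: int, radius: int) -> Tuple[Tuple[int, ...], ...]:
--     rows = len(grid)
--     cols = len(grid[0]) if grid else 0
--     patch: List[Tuple[int, ...]] = []
--     for patch_r in range(row_idx - radius, row_idx + radius + 1):
--         patch_row: List[int] = []
--         for patch_c in range(col_idx - radius, col_idx + radius + 1):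
--             if 0 <= patch_r < rows and 0 <= patch_c < cols:
--                 patch_row.append(grid[patch_r][patch_c])
--             else:
--                 patch_row.append(-1)
--         patch.append(tuple(patch_row))
--     return tuple(patch)
-- ===== SOURCE B (Python) =====
-- def _extract_local_patch(grid, row_idx, col_idx, radius):
--     rows = len(grid)
--     cols = len(grid[0]) if grid else 0
--     width = 2 * radius + 1
--     blank = (-1,) * width
--     lo = max(0, col_idx - radius)
--     hi = min(cols, col_idx + radius + 1)
--     left = lo - (col_idx - radius)
--     out = []
--     for pr in range(row_idx - radius, row_idx + radius + 1):
--         if 0 <= pr < rows and lo < hi: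
--             row = grid[pr]
--             out.append((-1,) * left + tuple(row[lo:hi]) + (-1,) * (width - left - (hi - lo)))
--         else:
--             out.append(blank)
--     return tuple(out)
-- ===== Notes on version B (the rewrite author's own statement) =====
-- stated objective: faster
-- what changed: Replaces the per-cell bounds test in a nested loop by a per-row decomposition: the column window and pad widths are computed once, and each row is built as left-pad + slice of the grid row + right-pad (or a reused precomputed blank row).
import Mathlib
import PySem

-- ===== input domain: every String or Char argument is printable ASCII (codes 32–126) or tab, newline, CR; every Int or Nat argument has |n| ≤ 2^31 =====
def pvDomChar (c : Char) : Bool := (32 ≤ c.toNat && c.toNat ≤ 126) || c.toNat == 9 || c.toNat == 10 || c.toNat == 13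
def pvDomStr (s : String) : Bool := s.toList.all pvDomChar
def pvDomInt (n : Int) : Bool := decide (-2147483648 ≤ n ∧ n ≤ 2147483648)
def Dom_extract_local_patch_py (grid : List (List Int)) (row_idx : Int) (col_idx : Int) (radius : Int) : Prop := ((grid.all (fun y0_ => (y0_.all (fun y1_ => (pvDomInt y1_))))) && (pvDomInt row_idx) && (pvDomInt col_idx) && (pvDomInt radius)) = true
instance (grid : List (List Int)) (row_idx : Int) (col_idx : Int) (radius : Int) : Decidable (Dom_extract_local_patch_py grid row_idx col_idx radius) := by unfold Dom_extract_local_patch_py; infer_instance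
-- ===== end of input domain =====

-- B replaces A's per-cell bounds test inside a nested loop by a per-row decomposition
-- (precomputed column window; each row is left-pad ++ slice ++ right-pad, or a blank row).
-- Objective: faster (measured). Equivalence is proved wherever A returns (Pre_).

-- ===== PORT A =====
def extract_local_patch_py (grid : List (List Int)) (row_idx : Int) (col_idx : Int) (radius : Int) : List (List Int) :=
  let rows : Int := grid.length
  let cols : Int := if grid.isEmpty then 0 else ((grid.headD []).length : Int)
  (PySem.List.pyRange (row_idx - radius) (row_idx + radius + 1)).map (fun patch_r =>
    (PySem.List.pyRange (col_idx - radius) (col_idx + radius + 1)).map (fun patch_c =>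
      if 0 ≤ patch_r ∧ patch_r < rows ∧ 0 ≤ patch_c ∧ patch_c < cols then
        -- grid[patch_r][patch_c]: both indices are in range here by the guard
        PySem.List.pyGetD (PySem.List.pyGetD grid patch_r []) patch_c (-1)
      else (-1 : Int)))

-- ===== PORT B =====
def extract_local_patch_py_alt (grid : List (List Int)) (row_idx : Int) (col_idx : Int) (radius : Int) : List (List Int) :=
  let rows : Int := grid.length
  let cols : Int := if grid.isEmpty then 0 else ((grid.headD []).length : Int)
  let width : Int := 2 * radius + 1
  let blank : List Int := List.replicate width.toNat (-1)   -- (-1,) * width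
  let lo : Int := max 0 (col_idx - radius)
  let hi : Int := min cols (col_idx + radius + 1)
  let left : Int := lo - (col_idx - radius)
  (PySem.List.pyRange (row_idx - radius) (row_idx + radius + 1)).map (fun pr =>
    if 0 ≤ pr ∧ pr < rows ∧ lo < hi then
      let row := PySem.List.pyGetD grid pr []   -- grid[pr]: in range by the guard
      List.replicate left.toNat (-1) ++ PySem.List.slice row (some lo) (some hi)
        ++ List.replicate (width - left - (hi - lo)).toNat (-1)
    else blank)

-- ===== PRECONDITION & SPEC =====
-- Pre_ excludes exactly the ragged grids on which A raises IndexError: a row inside the patch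
-- window shorter than the window's right edge min(len(grid[0]), col_idx+radius+1).
def Pre_extract_local_patch_py (grid : List (List Int)) (row_idx : Int) (col_idx : Int) (radius : Int) : Prop :=
  ∀ k : Nat, k < grid.length →
    row_idx - radius ≤ (k : Int) → (k : Int) < row_idx + radius + 1 →
    max 0 (col_idx - radius) < min (((grid.headD []).length : Int)) (col_idx + radius + 1) →
    min (((grid.headD []).length : Int)) (col_idx + radius + 1) ≤ ((grid.getD k []).length : Int)
instance (grid : List (List Int)) (row_idx : Int) (col_idx : Int) (radius : Int) : Decidable (Pre_extract_local_patch_py grid row_idx col_idx radius) := by unfold Pre_extract_local_patch_py; infer_instance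

def pvWitness_extract_local_patch_py : List (List Int) × Int × Int × Int := ([[1, 2], [3, 4]], 0, 1, 1)

def Spec_extract_local_patch_py (grid : List (List Int)) (row_idx : Int) (col_idx : Int) (radius : Int) (out : List (List Int)) : Prop := out = extract_local_patch_py_alt grid row_idx col_idx radius
instance (grid : List (List Int)) (row_idx : Int) (col_idx : Int) (radius : Int) (out : List (List Int)) : Decidable (Spec_extract_local_patch_py grid row_idx col_idx radius out) := by unfold Spec_extract_local_patch_py; infer_instance

-- ===== CLAIM (what is proved, stated in full; the proofs are below) =====
def Claim_equal_extract_local_patch_py : Prop := ∀ (grid : List (List Int)) (row_idx : Int) (col_idx : Int) (radius : Int), Dom_extract_local_patch_py grid row_idx col_idx radius → Pre_extract_local_patch_py grid row_idx col_idx radius → Spec_extract_local_patch_py grid row_idx col_idx radius (extract_local_patch_py grid row_idx col_idx radius)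

-- ===== LEMMAS AND PROOFS =====

-- a range of indices mapped through pyGetD is a slice (0 ≤ a ≤ b ≤ |xs|)
lemma map_pyGetD_eq_slice (xs : List Int) (a b : Int) (d : Int)
    (h0 : 0 ≤ a) (hab : a ≤ b) (hb : b ≤ (xs.length : Int)) :
    (PySem.List.pyRange a b).map (fun j => PySem.List.pyGetD xs j d)
      = PySem.List.slice xs (some a) (some b) := by
  rw [PySem.List.slice_toNat xs h0 (le_trans h0 hab)]
  apply List.ext_getElem
  · simp [PySem.List.length_pyRange_one]
    omega
  · intro k h1 h2
    simp only [List.getElem_map, PySem.List.getElem_pyRange_one]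
    rw [List.getElem_take, List.getElem_drop]
    rw [PySem.List.pyGetD_eq_getElem xs d (by omega)
      (by simp [PySem.List.length_pyRange_one] at h1; omega)]
    congr 1
    simp [PySem.List.length_pyRange_one] at h1
    omega

-- a range mapped through a function constant on it is a replicate
lemma map_const_on_range (a b : Int) (f : Int → Int) (c : Int)
    (h : ∀ x, a ≤ x → x < b → f x = c) :
    (PySem.List.pyRange a b).map f = List.replicate (b - a).toNat c := by
  rw [List.map_congr_left (g := fun _ => c)
      (fun x hx => h x (PySem.List.mem_pyRange_one.mp hx).1 (PySem.List.mem_pyRange_one.mp hx).2)]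
  rw [List.map_const', PySem.List.length_pyRange_one]

-- ===== VERDICT (by name: the statement is the Claim_ definition above) =====
theorem extract_local_patch_py_spec : Claim_equal_extract_local_patch_py := by
  intro grid ri ci rad _ hpre
  unfold Spec_extract_local_patch_py extract_local_patch_py extract_local_patch_py_alt
  simp only []
  apply List.map_congr_left
  intro pr hpr
  set rows : Int := (grid.length : Int) with hrows
  set cols : Int := if grid.isEmpty then 0 else ((grid.headD []).length : Int) with hcols
  set c0 : Int := ci - rad with hc0
  set c1 : Int := ci + rad + 1 with hc1
  set lo : Int := max 0 c0 with hlo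
  set hi : Int := min cols c1 with hhi
  have hcols0 : 0 ≤ cols := by
    rw [hcols]; split <;> simp
  by_cases hcond : 0 ≤ pr ∧ pr < rows ∧ lo < hi
  · obtain ⟨h1, h2, h3⟩ := hcond
    rw [if_pos ⟨h1, h2, h3⟩]
    -- the selected row and its length
    set row : List Int := PySem.List.pyGetD grid pr [] with hrow
    have hne : ¬ grid.isEmpty := by
      rcases grid with _ | _
      · simp [hrows] at h2; omega
      · simp
    have hcolseq : cols = ((grid.headD []).length : Int) := by
      rw [hcols, if_neg hne]
    have hprm := PySem.List.mem_pyRange_one.mp hpr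
    have hklt : pr.toNat < grid.length := by omega
    have hrow' : row = grid.getD pr.toNat [] := by
      rw [hrow, PySem.List.pyGetD_eq_getElem grid [] h1 h2, List.getD_eq_getElem _ _ hklt]
    have hlen : hi ≤ (row.length : Int) := by
      have := hpre pr.toNat hklt (by omega) (by omega)
        (by rw [hlo, hhi, hcolseq] at h3; exact h3)
      rw [hrow', hhi, hcolseq]
      exact this
    -- split the column range at lo and hi
    have hsplit : PySem.List.pyRange c0 c1
        = PySem.List.pyRange c0 lo ++ PySem.List.pyRange lo hi ++ PySem.List.pyRange hi c1 := by
      rw [List.append_assoc, ← PySem.List.pyRange_one_append lo hi c1 (le_of_lt h3) (by omega)]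
      rw [← PySem.List.pyRange_one_append c0 lo c1 (by omega) (by omega)]
    rw [hsplit, List.map_append, List.map_append]
    congr 1
    congr 1
    · -- left pad: every index below lo is out of bounds on the left
      rw [map_const_on_range c0 lo _ (-1) (fun x hx1 hx2 => by
        rw [if_neg]; omega)]
    · -- middle: in-bounds cells are a slice of the row
      rw [List.map_congr_left (g := fun j => PySem.List.pyGetD row j (-1))
          (fun x hx => by
            have := PySem.List.mem_pyRange_one.mp hx
            rw [if_pos ⟨h1, h2, by omega⟩])]
      exact map_pyGetD_eq_slice row lo hi (-1) (by omega) (le_of_lt h3) hlen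
    · -- right pad: every index from hi on is out of bounds on the right
      rw [map_const_on_range hi c1 _ (-1) (fun x hx1 hx2 => by
        rw [if_neg]; omega)]
      congr 1
      omega
  · rw [if_neg hcond]
    rw [map_const_on_range c0 c1 _ (-1) (fun x hx1 hx2 => by
      rw [if_neg]; intro ⟨g1, g2, g3, g4⟩
      rcases not_and_or.mp hcond with h | h
      · exact h g1
      rcases not_and_or.mp h with h | h
      · exact h g2
      · apply h; omega)]
    congr 1
    omega
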